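-- pv_equiv track=rewrite | github.com/DonghyunSung-MS/Algorithms_study | swea/요리사.py | nPc
-- ===== SOURCE A (Python) =====
-- def nPc(lst, c):
--     if c==0:
--         return [[]]
--
--     result = []
--     for i, ele in enumerate(lst):
--         m = ele
--         rest = lst[:i] + lst[i+1:]
--         # rest = lst[i+1:] #조합
--         for ele_prev in nPc(rest, c - 1):
--             result.append([m]+ele_prev)
--
--     return result
-- ===== SOURCE B (Python) =====
-- def _picks(pool):
--     # all (chosen element, pool with that element removed), left to right
--     return [(pool[i], pool[:i] + pool[i + 1:]) for i in range(len(pool))]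
--
--
-- def nPc(lst, c):
--     # iterative worklist of (prefix, remaining pool) pairs, expanded level by level
--     work = [([], lst)]
--     while c != 0 and work:
--         c -= 1
--         work = [(pre + [x], rest) for pre, pool in work for x, rest in _picks(pool)]
--     return [pre for pre, _ in work]
-- ===== Notes on version B (the rewrite author's own statement) =====
-- stated objective: alternative
-- what changed: Replaces A's branching recursion (recursing on the shrunken pool for each chosen head) by an iterative breadth-first worklist of (prefix, remaining-pool) pairs expanded level by level until the count is exhausted or every pool runs dry.
import Mathlib
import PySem

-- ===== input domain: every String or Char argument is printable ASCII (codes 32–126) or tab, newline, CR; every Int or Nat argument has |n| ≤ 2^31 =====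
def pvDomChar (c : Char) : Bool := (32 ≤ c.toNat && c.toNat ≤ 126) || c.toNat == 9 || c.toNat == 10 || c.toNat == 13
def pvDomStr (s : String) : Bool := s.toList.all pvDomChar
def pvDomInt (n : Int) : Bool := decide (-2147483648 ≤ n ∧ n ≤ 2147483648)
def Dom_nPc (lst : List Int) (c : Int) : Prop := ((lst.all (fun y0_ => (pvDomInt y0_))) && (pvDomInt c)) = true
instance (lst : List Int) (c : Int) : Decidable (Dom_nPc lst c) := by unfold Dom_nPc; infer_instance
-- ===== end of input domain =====

-- B replaces A's branching recursion by an iterative level-by-level worklist of (prefix, pool) pairs; alternative decomposition, similar cost.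

-- ===== PORT A =====
-- literal transliteration: the for-loop over enumerate(lst) is a foldl over the
-- attached enumeration (attach only supplies the membership fact for termination)
def nPc (lst : List Int) (c : Int) : List (List Int) :=
  if c == 0 then [[]]
  else
    (PySem.List.enumerate lst).attach.foldl
      (fun result p =>
        -- m = ele; rest = lst[:i] + lst[i+1:]  (inlined)
        result ++
          (nPc (PySem.List.slice lst none (some p.1.1) ++ PySem.List.slice lst (some (p.1.1 + 1)) none)
              (c - 1)).map
            (fun ele_prev => p.1.2 :: ele_prev))
      []
termination_by lst.length
decreasing_by
  obtain ⟨k, hk, hp⟩ := (PySem.List.mem_enumerate_iff _ _ _).1 p.2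
  simp only [hp]
  have h1 : PySem.List.slice lst none (some ((0:Int) + (k:Int))) = lst.take k := by
    rw [zero_add]; exact PySem.List.slice_to_natCast lst k
  have h2 : PySem.List.slice lst (some ((0:Int) + (k:Int) + 1)) none = lst.drop (k+1) := by
    have : ((0:Int) + (k:Int) + 1) = ((k+1 : Nat) : Int) := by push_cast; ring
    rw [this, PySem.List.slice_from_natCast]
  rw [h1, h2]
  simp [List.length_take, List.length_drop]
  omega

-- ===== PORT B =====
-- helper _picks: all (chosen element, pool without it) pairs, left to right
def picks (pool : List Int) : List (Int × List Int) :=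
  (PySem.List.pyRange 0 pool.length 1).map
    (fun i => (PySem.List.pyGetD pool i 0,
      PySem.List.slice pool none (some i) ++ PySem.List.slice pool (some (i + 1)) none))

-- one round of the worklist expansion (the comprehension in B's while body)
def nPcStep (work : List (List Int × List Int)) : List (List Int × List Int) :=
  work.flatMap (fun pr => (picks pr.2).map (fun q => (pr.1 ++ [q.1], q.2)))

-- termination measure for the while loop: 1 + the largest remaining pool size
def poolSup (work : List (List Int × List Int)) : Nat :=
  work.foldr (fun pr a => max (pr.2.length + 1) a) 0

lemma picks_eq_enumerate (lst : List Int) :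
    picks lst = (PySem.List.enumerate lst).map
      (fun p => (p.2, PySem.List.slice lst none (some p.1) ++ PySem.List.slice lst (some (p.1 + 1)) none)) := by
  rw [PySem.List.enumerate_eq_map_pyRange (d := 0), List.map_map]
  rfl

lemma slice_pair_eq (lst : List Int) (k : Nat) :
    PySem.List.slice lst none (some ((k:Int))) ++ PySem.List.slice lst (some ((k:Int) + 1)) none
      = lst.take k ++ lst.drop (k+1) := by
  have h1 : PySem.List.slice lst none (some ((k:Int))) = lst.take k :=
    PySem.List.slice_to_natCast lst k
  have h2 : PySem.List.slice lst (some ((k:Int) + 1)) none = lst.drop (k+1) := by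
    have : ((k:Int) + 1) = ((k+1 : Nat) : Int) := by push_cast; ring
    rw [this, PySem.List.slice_from_natCast]
  rw [h1, h2]

lemma picks_snd_length {pool : List Int} {q : Int × List Int} (h : q ∈ picks pool) :
    q.2.length + 1 = pool.length := by
  rw [picks_eq_enumerate] at h
  obtain ⟨p, hp, hq⟩ := List.mem_map.1 h
  obtain ⟨k, hk, hpk⟩ := (PySem.List.mem_enumerate_iff _ _ _).1 hp
  subst hq; subst hpk
  have := slice_pair_eq pool k
  simp only [zero_add] at *
  rw [this]
  simp
  omega

lemma le_poolSup {work : List (List Int × List Int)} {pr} (h : pr ∈ work) :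
    pr.2.length + 1 ≤ poolSup work := by
  induction work with
  | nil => simp at h
  | cons w ws ih =>
    simp [poolSup] at *
    rcases h with h | h
    · left; simp [h]
    · right; exact ih h

lemma poolSup_le {work : List (List Int × List Int)} {B : Nat}
    (h : ∀ pr ∈ work, pr.2.length + 1 ≤ B) : poolSup work ≤ B := by
  induction work with
  | nil => simp [poolSup]
  | cons w ws ih =>
    simp [poolSup] at *
    exact ⟨h.1, ih h.2⟩

lemma poolSup_pos {work : List (List Int × List Int)} (h : work ≠ []) : 1 ≤ poolSup work := by
  cases work with
  | nil => simp at h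
  | cons w ws => simp [poolSup]

lemma nPcStep_poolSup_lt {work : List (List Int × List Int)} (h : work ≠ []) :
    poolSup (nPcStep work) < poolSup work := by
  have h1 := poolSup_pos h
  have : poolSup (nPcStep work) ≤ poolSup work - 1 := by
    apply poolSup_le
    intro pr hpr
    obtain ⟨w, hw, hpr2⟩ := List.mem_flatMap.1 hpr
    obtain ⟨q, hq, hpr3⟩ := List.mem_map.1 hpr2
    have h2 : q.2.length + 1 = w.2.length := picks_snd_length hq
    have h3 : w.2.length + 1 ≤ poolSup work := le_poolSup hw
    subst hpr3
    simp
    omega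
  omega

-- the while loop: continue while c != 0 and work nonempty
def nPcLoop (work : List (List Int × List Int)) (c : Int) : List (List Int × List Int) :=
  if c ≠ 0 ∧ work ≠ [] then nPcLoop (nPcStep work) (c - 1) else work
termination_by poolSup work
decreasing_by rename_i h; exact nPcStep_poolSup_lt h.2

def nPc_alt (lst : List Int) (c : Int) : List (List Int) :=
  (nPcLoop [([], lst)] c).map (fun pr => pr.1)

-- ===== PRECONDITION & SPEC =====
def Spec_nPc (lst : List Int) (c : Int) (out : List (List Int)) : Prop := out = nPc_alt lst c
instance (lst : List Int) (c : Int) (out : List (List Int)) : Decidable (Spec_nPc lst c out) := by unfold Spec_nPc; infer_instance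

-- ===== CLAIM (what is proved, stated in full; the proofs are below) =====
def Claim_equal_nPc : Prop := ∀ (lst : List Int) (c : Int), Dom_nPc lst c → Spec_nPc lst c (nPc lst c)

-- ===== LEMMAS AND PROOFS =====

lemma flatMap_single (work : List (List Int × List Int)) :
    work.flatMap (fun pr => [pr.1]) = work.map (fun pr => pr.1) := by
  induction work with
  | nil => rfl
  | cons w ws ih => simp [ih]

lemma nPc_char (lst : List Int) (c : Int) (h : c ≠ 0) :
    nPc lst c = (picks lst).flatMap (fun q => (nPc q.2 (c-1)).map (q.1 :: ·)) := by
  rw [nPc.eq_def, if_neg (by simpa using h)]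
  have h0 := List.foldl_attach
    (l := PySem.List.enumerate lst)
    (f := fun result p => result ++
      (nPc (PySem.List.slice lst none (some p.1) ++ PySem.List.slice lst (some (p.1 + 1)) none)
          (c - 1)).map (fun ele_prev => p.2 :: ele_prev))
    (b := ([] : List (List Int)))
  rw [h0, PySem.List.foldl_append_eq_flatMap]
  rw [picks_eq_enumerate, List.flatMap_map]
  simp

lemma nPc_zero (pool : List Int) : nPc pool 0 = [[]] := by rw [nPc.eq_def]; simp

lemma loop_inv (work : List (List Int × List Int)) (c : Int) :
    (nPcLoop work c).map (fun pr => pr.1)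
      = work.flatMap (fun pr => (nPc pr.2 c).map (pr.1 ++ ·)) := by
  induction work, c using nPcLoop.induct with
  | case1 work c hcond ih =>
    rw [nPcLoop.eq_def]
    simp only [if_pos hcond]
    rw [ih, nPcStep]
    simp only [List.flatMap_assoc, List.flatMap_map]
    apply List.flatMap_congr
    intro pr _
    rw [nPc_char pr.2 c hcond.1, List.map_flatMap]
    simp [Function.comp_def]
  | case2 work c hcond =>
    rw [nPcLoop.eq_def, if_neg hcond]
    rcases not_and_or.1 hcond with h | h
    · have hc : c = 0 := by simpa using h
      subst hc
      simp only [nPc_zero, List.map_singleton, List.append_nil]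
      exact (flatMap_single work).symm
    · have : work = [] := by simpa using h
      subst this; simp

-- ===== VERDICT (by name: the statement is the Claim_ definition above) =====
theorem nPc_spec : Claim_equal_nPc := by
  intro lst c _
  unfold Spec_nPc nPc_alt
  rw [loop_inv]
  simp
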